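-- pv_equiv track=rewrite | github.com/dtunkelang/y2karaoke | src/y2karaoke/core/visual/bootstrap_ocr_filters.py | count_dense_line_groups
-- ===== SOURCE A (Python) =====
-- from typing import Any, Callable
--
-- def count_dense_line_groups(words: list[dict[str, Any]]) -> int:
--     if not words:
--         return 0
--     ys = sorted(int(w.get("y", 0)) for w in words if isinstance(w, dict))
--     if not ys:
--         return 0
--     groups: list[list[int]] = [[ys[0]]]
--     for y in ys[1:]:
--         if y - groups[-1][-1] < 22:
--             groups[-1].append(y)
--         else:
--             groups.append([y])
--     return sum(1 for g in groups if len(g) >= 2)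
-- ===== SOURCE B (Python) =====
-- def count_dense_line_groups(words: list[dict[str, "Any"]]) -> int:
--     if not words:
--         return 0
--     ys = sorted(int(w.get("y", 0)) for w in words if isinstance(w, dict))
--     if not ys:
--         return 0
--     count = 0
--     in_group = False
--     for prev, cur in zip(ys, ys[1:]):
--         if cur - prev < 22:
--             if not in_group:
--                 count += 1
--             in_group = True
--         else:
--             in_group = False
--     return count
-- ===== Notes on version B (the rewrite author's own statement) =====
-- stated objective: simpler
-- what changed: Instead of materializing adjacency groups as lists of lists and counting those of length >= 2, B scans consecutive sorted pairs once with a boolean flag and counts rising edges of dense runs, using O(1) extra space.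
import Mathlib
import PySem

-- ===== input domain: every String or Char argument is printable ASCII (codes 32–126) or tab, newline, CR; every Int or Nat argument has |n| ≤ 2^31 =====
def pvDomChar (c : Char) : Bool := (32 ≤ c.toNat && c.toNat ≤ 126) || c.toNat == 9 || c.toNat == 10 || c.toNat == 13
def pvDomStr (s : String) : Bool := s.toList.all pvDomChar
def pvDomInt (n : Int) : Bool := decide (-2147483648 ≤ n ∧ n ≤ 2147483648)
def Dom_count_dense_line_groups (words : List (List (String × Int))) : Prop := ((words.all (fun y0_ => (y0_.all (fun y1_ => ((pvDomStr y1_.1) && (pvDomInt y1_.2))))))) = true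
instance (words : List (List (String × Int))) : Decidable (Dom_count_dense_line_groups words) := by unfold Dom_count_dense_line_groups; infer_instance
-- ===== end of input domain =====

-- B replaces A's list-of-groups materialization by a one-pass flag scan over consecutive
-- sorted pairs counting rising edges of dense runs (objective: simpler, O(1) extra space).


-- ===== PORT A =====
-- helper: the sorted y-values (the generator's isinstance(w, dict) filter keeps every
-- element under the type convention, and int() on an int is the identity)
def pvYs (words : List (List (String × Int))) : List Int :=
  PySem.List.sorted (words.map (fun w => PySem.Dict.getD (PySem.Dict.mk w) "y" 0)) (fun x => x) false

-- one iteration of A's for-loop over groups (groups is always nonempty, so the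
-- getLast?/getD defaults are never used, matching groups[-1][-1])
def pvStepA (groups : List (List Int)) (y : Int) : List (List Int) :=
  if y - ((groups.getLast?.getD []).getLast?.getD 0) < 22 then
    groups.dropLast ++ [(groups.getLast?.getD []) ++ [y]]
  else
    groups ++ [[y]]

-- sum(1 for g in groups if len(g) >= 2)
def pvCountFull (groups : List (List Int)) : Int :=
  ((groups.filter (fun g => decide (2 ≤ g.length))).length : Int)

def count_dense_line_groups (words : List (List (String × Int))) : Int :=
  if words = [] then 0
  else
    match pvYs words with
    | [] => 0
    | y0 :: rest => pvCountFull (rest.foldl pvStepA [[y0]])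

-- ===== PORT B =====
-- one iteration of B's flag scan: state = (count, in_group), pc = (prev, cur)
def pvStepB (st : Int × Bool) (pc : Int × Int) : Int × Bool :=
  if pc.2 - pc.1 < 22 then ((if st.2 then st.1 else st.1 + 1), true)
  else (st.1, false)

def count_dense_line_groups_alt (words : List (List (String × Int))) : Int :=
  if words = [] then 0
  else
    match pvYs words with
    | [] => 0
    | y0 :: rest => ((List.zip (y0 :: rest) rest).foldl pvStepB (0, false)).1

-- ===== PRECONDITION & SPEC =====
def Spec_count_dense_line_groups (words : List (List (String × Int))) (out : Int) : Prop := out = count_dense_line_groups_alt words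
instance (words : List (List (String × Int))) (out : Int) : Decidable (Spec_count_dense_line_groups words out) := by unfold Spec_count_dense_line_groups; infer_instance

-- ===== CLAIM (what is proved, stated in full; the proofs are below) =====
def Claim_equal_count_dense_line_groups : Prop := ∀ (words : List (List (String × Int))), Dom_count_dense_line_groups words → Spec_count_dense_line_groups words (count_dense_line_groups words)

-- ===== LEMMAS AND PROOFS =====

theorem pvCountFull_concat (gs : List (List Int)) (g : List Int) :
    pvCountFull (gs ++ [g]) = pvCountFull gs + (if 2 ≤ g.length then 1 else 0) := by
  simp [pvCountFull, List.filter_append]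
  split_ifs with h <;> simp [h]

-- loop invariant: A's fold over `rest` from groups `gs ++ [g]` (g nonempty with last
-- element p) yields the same count as B's flag scan over the remaining pairs from the
-- corresponding state.
theorem pv_key (rest : List Int) :
    ∀ (gs : List (List Int)) (g : List Int) (p : Int), g.getLast? = some p →
    pvCountFull (rest.foldl pvStepA (gs ++ [g]))
      = ((List.zip (p :: rest) rest).foldl pvStepB
          (pvCountFull gs + (if 2 ≤ g.length then 1 else 0), decide (2 ≤ g.length))).1 := by
  induction rest with
  | nil =>
      intro gs g p hp
      simp [pvCountFull_concat]
  | cons y rest ih =>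
      intro gs g p hp
      have hgne : g ≠ [] := by
        intro h; simp [h] at hp
      by_cases hcond : y - p < 22
      · have hstep : pvStepA (gs ++ [g]) y = gs ++ [g ++ [y]] := by
          simp [pvStepA, hp, hcond]
        have hlen : 2 ≤ (g ++ [y]).length := by
          cases g with
          | nil => exact absurd rfl hgne
          | cons a as => simp only [List.length_append, List.length_cons]; omega
        have := ih gs (g ++ [y]) y (by simp)
        simp only [List.foldl_cons, hstep, this, hlen, if_pos]
        have hzip : List.zip (p :: y :: rest) (y :: rest) = (p, y) :: List.zip (y :: rest) rest := by
          simp [List.zip]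
        rw [hzip]
        simp only [List.foldl_cons]
        congr 1
        simp [pvStepB, hcond]
        split_ifs <;> simp_all
      · have hstep : pvStepA (gs ++ [g]) y = (gs ++ [g]) ++ [[y]] := by
          simp [pvStepA, hp, hcond]
        have := ih (gs ++ [g]) [y] y (by simp)
        simp only [List.foldl_cons, hstep, this]
        have hzip : List.zip (p :: y :: rest) (y :: rest) = (p, y) :: List.zip (y :: rest) rest := by
          simp [List.zip]
        rw [hzip]
        simp only [List.foldl_cons]
        congr 1
        simp [pvStepB, hcond, pvCountFull_concat]


-- ===== VERDICT (by name: the statement is the Claim_ definition above) =====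
theorem count_dense_line_groups_spec : Claim_equal_count_dense_line_groups := by
  intro words _
  unfold Spec_count_dense_line_groups count_dense_line_groups count_dense_line_groups_alt
  by_cases hw : words = []
  · simp [hw]
  · simp only [hw, if_false]
    cases hys : pvYs words with
    | nil => rfl
    | cons y0 rest =>
        have := pv_key rest [] [y0] y0 (by simp)
        simpa using this
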